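-- pv_equiv track=rewrite | github.com/adeelahmad/mlx_rl_trainer | src/mlx_rl_trainer/utils/mlx_utils.py | _indices_to_letters
-- ===== SOURCE A (Python) =====
-- import string
-- from typing import Any, Callable, Dict, List, Optional, Sequence, Set, Tuple, Union
-- import string
-- from typing import Any, Dict, List, Optional, Sequence, Set, Tuple, Callable, Union
-- import string
-- from typing import Any, Dict, List, Optional, Sequence, Set, Tuple, Callable, Union
--
-- LETTER_ALPH = string.ascii_uppercase
--
-- def _indices_to_letters(indices: List[int]) -> str:
--     """Converts a list of 0-based indices to comma-separated letters (e.g., [0, 2] -> 'A,C')."""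
--     letters = [LETTER_ALPH[idx] for idx in indices if 0 <= idx < len(LETTER_ALPH)]
--     seen, out = set(), []
--     for L in sorted(letters):
--         if L not in seen:
--             seen.add(L)
--             out.append(L)
--     return ",".join(out)
-- ===== SOURCE B (Python) =====
-- def _indices_to_letters(indices):
--     """Converts a list of 0-based indices to comma-separated letters (e.g., [0, 2] -> 'A,C')."""
--     present = set(range(26)).intersection(indices)
--     return ",".join(chr(65 + k) for k in range(26) if k in present)
-- ===== Notes on version B (the rewrite author's own statement) =====
-- stated objective: alternative
-- what changed: Replaces the filter-comprehension + sort + seen-set dedup with a set(range(26)).intersection(indices) presence set and an in-order A-Z emit, removing the sort.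
import Mathlib
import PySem

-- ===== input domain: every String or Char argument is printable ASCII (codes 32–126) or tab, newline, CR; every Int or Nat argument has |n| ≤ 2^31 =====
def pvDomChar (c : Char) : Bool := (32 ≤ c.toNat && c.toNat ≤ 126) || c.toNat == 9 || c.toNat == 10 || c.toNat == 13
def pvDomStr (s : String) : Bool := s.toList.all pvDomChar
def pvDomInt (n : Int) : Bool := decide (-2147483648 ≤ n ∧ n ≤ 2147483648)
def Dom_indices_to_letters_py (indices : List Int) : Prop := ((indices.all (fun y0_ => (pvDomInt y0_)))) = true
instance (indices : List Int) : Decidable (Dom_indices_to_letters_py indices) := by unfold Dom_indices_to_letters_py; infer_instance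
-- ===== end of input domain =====

-- B replaces A's filter+sort+seen-set dedup with a set-intersection presence set and an in-order A–Z emit (neither version mutates its argument).

-- ===== PORT A =====
def LETTER_ALPH : List Char := "ABCDEFGHIJKLMNOPQRSTUVWXYZ".toList

-- the list comprehension: [LETTER_ALPH[idx] for idx in indices if 0 <= idx < len(LETTER_ALPH)]
def A_letters (indices : List Int) : List Char :=
  (indices.filter (fun idx => decide (0 ≤ idx) && decide (idx < PySem.List.len LETTER_ALPH))).map
    (fun idx => PySem.List.pyGetD LETTER_ALPH idx 'A')

-- the seen/out loop: for L in …: if L not in seen: seen.add(L); out.append(L)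
def A_dedup (ys : List Char) : PySem.Set Char × List Char :=
  ys.foldl
    (fun (st : PySem.Set Char × List Char) L =>
      if PySem.Set.contains st.1 L then st
      else (PySem.Set.add st.1 L, st.2 ++ [L]))
    (PySem.Set.empty, [])

def indices_to_letters_py (indices : List Int) : String :=
  PySem.Str.join ","
    ((A_dedup (PySem.List.sorted (A_letters indices) (fun x => x) false)).2.map
      (fun L => String.ofList [L]))

-- ===== PORT B =====
-- present = set(range(26)).intersection(indices)
def B_present (indices : List Int) : PySem.Set Int :=
  PySem.Set.inter (PySem.Set.ofList (PySem.List.pyRange 0 26 1)) indices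

def indices_to_letters_py_alt (indices : List Int) : String :=
  PySem.Str.join ","
    (((PySem.List.pyRange 0 26 1).filter (fun k => PySem.Set.contains (B_present indices) k)).map
      (fun k => String.ofList [Char.ofNat (65 + k).toNat]))

-- ===== PRECONDITION & SPEC =====
def Spec_indices_to_letters_py (indices : List Int) (out : String) : Prop := out = indices_to_letters_py_alt indices
instance (indices : List Int) (out : String) : Decidable (Spec_indices_to_letters_py indices out) := by unfold Spec_indices_to_letters_py; infer_instance

-- ===== CLAIM (what is proved, stated in full; the proofs are below) =====
def Claim_equal_indices_to_letters_py : Prop := ∀ (indices : List Int), Dom_indices_to_letters_py indices → Spec_indices_to_letters_py indices (indices_to_letters_py indices)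

-- ===== LEMMAS AND PROOFS =====

-- A's seen/out loop keeps the pair components equal and is exactly repeated PySem.Set.add
theorem loop_pair (xs : List Char) (s : PySem.Set Char) :
    xs.foldl (fun (st : PySem.Set Char × List Char) L =>
        if PySem.Set.contains st.1 L then st
        else (PySem.Set.add st.1 L, st.2 ++ [L])) (s, s)
      = (xs.foldl PySem.Set.add s, xs.foldl PySem.Set.add s) := by
  induction xs generalizing s with
  | nil => rfl
  | cons x xs ih =>
    by_cases h : x ∈ s
    · have hc : PySem.Set.contains s x = true := by simpa using h
      have ha : PySem.Set.add s x = s := by simp [PySem.Set.add, h]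
      simp only [List.foldl, hc, if_true, ha]
      exact ih s
    · have hc : PySem.Set.contains s x = false := by simpa using h
      have ha : PySem.Set.add s x = s ++ [x] := by simp [PySem.Set.add, h]
      simp only [List.foldl, hc, Bool.false_eq_true, if_false, ha]
      exact ih (s ++ [x])

theorem A_dedup_snd (ys : List Char) : (A_dedup ys).2 = PySem.Set.ofList ys := by
  unfold A_dedup
  rw [PySem.Set.ofList_eq_foldl]
  exact congrArg Prod.snd (loop_pair ys PySem.Set.empty)

theorem foldl_add_sublist (xs : List Char) (s : List Char) :
    (xs.foldl PySem.Set.add s).Sublist (s ++ xs) := by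
  induction xs generalizing s with
  | nil => simp
  | cons x xs ih =>
    simp only [List.foldl]
    by_cases h : x ∈ s
    · have ha : PySem.Set.add s x = s := by simp [PySem.Set.add, h]
      rw [ha]
      exact (ih s).trans (by simp)
    · have ha : PySem.Set.add s x = s ++ [x] := by simp [PySem.Set.add, h]
      rw [ha]
      simpa using ih (s ++ [x])

theorem ofList_sublist (xs : List Char) : (PySem.Set.ofList xs).Sublist xs := by
  rw [PySem.Set.ofList_eq_foldl]
  simpa using foldl_add_sublist xs []

-- LETTER_ALPH[k] is chr(65+k) for k < 26
theorem alph_getD : ∀ k : Nat, k < 26 → LETTER_ALPH.getD k 'A' = Char.ofNat (65 + k) := by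
  decide

theorem chr_mono : ∀ a, a < 26 → ∀ b, b < 26 → a < b →
    Char.ofNat (65 + a) < Char.ofNat (65 + b) := by
  decide

-- membership of c in A's comprehension ↔ presence of its index
theorem mem_A_letters (indices : List Int) (c : Char) :
    c ∈ A_letters indices ↔
      ∃ k : Nat, k < 26 ∧ (indices.any (fun i => i == (k : Int))) = true ∧ c = Char.ofNat (65 + k) := by
  unfold A_letters
  simp only [List.mem_map, List.mem_filter, Bool.and_eq_true, decide_eq_true_eq,
    PySem.List.len_eq, List.any_eq_true, beq_iff_eq]
  constructor
  · rintro ⟨idx, ⟨hidx, h0, hlt⟩, rfl⟩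
    have hlen : LETTER_ALPH.length = 26 := by decide
    refine ⟨idx.toNat, by omega, ⟨idx, hidx, by omega⟩, ?_⟩
    have : idx = ((idx.toNat : Nat) : Int) := by omega
    rw [this, PySem.List.pyGetD_natCast]
    exact alph_getD idx.toNat (by omega)
  · rintro ⟨k, hk, ⟨i, hi, rfl⟩, rfl⟩
    have hlen : LETTER_ALPH.length = 26 := by decide
    refine ⟨(k : Int), ⟨hi, by omega, by simp [hlen]; omega⟩, ?_⟩
    rw [PySem.List.pyGetD_natCast]
    exact alph_getD k hk

-- the canonical strictly increasing result list
theorem core_eq (indices : List Int) :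
    PySem.Set.ofList (PySem.List.sorted (A_letters indices) (fun x => x) false)
      = ((List.range 26).filter (fun (k : Nat) => indices.any (fun i => i == (k : Int)))).map
          (fun k => Char.ofNat (65 + k)) := by
  set L := PySem.Set.ofList (PySem.List.sorted (A_letters indices) (fun x => x) false) with hL
  set C := ((List.range 26).filter (fun (k : Nat) => indices.any (fun i => i == (k : Int)))).map
      (fun k => Char.ofNat (65 + k)) with hC
  have hLnd : L.Nodup := PySem.Set.nodup_ofList _
  have hLle : L.Pairwise (· ≤ ·) :=
    List.Pairwise.sublist (ofList_sublist _) (PySem.List.sorted_pairwise (A_letters indices) (fun x => x))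
  have hLlt : L.Pairwise (· < ·) :=
    (hLle.and hLnd).imp (fun h => lt_of_le_of_ne h.1 h.2)
  have hClt : C.Pairwise (· < ·) := by
    rw [hC, List.pairwise_map]
    refine List.Pairwise.imp_of_mem ?_ ((List.pairwise_lt_range).filter _)
    intro a b ha hb hab
    have ha26 : a < 26 := List.mem_range.mp (List.mem_of_mem_filter ha)
    have hb26 : b < 26 := List.mem_range.mp (List.mem_of_mem_filter hb)
    exact chr_mono a ha26 b hb26 hab
  have hCnd : C.Nodup := hClt.imp (fun h => ne_of_lt h)
  have hmem : ∀ c, c ∈ L ↔ c ∈ C := by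
    intro c
    rw [hL, PySem.Set.mem_ofList, PySem.List.mem_sorted, mem_A_letters, hC]
    simp only [List.mem_map, List.mem_filter, List.mem_range]
    constructor
    · rintro ⟨k, hk, hany, rfl⟩; exact ⟨k, ⟨hk, hany⟩, rfl⟩
    · rintro ⟨k, ⟨hk, hany⟩, rfl⟩; exact ⟨k, hk, hany, rfl⟩
  have hperm : L.Perm C := (List.perm_ext_iff_of_nodup hLnd hCnd).mpr hmem
  exact List.Perm.eq_of_pairwise (fun a b _ _ h1 h2 => absurd h2 (asymm h1)) hLlt hClt hperm

theorem lists_eq (indices : List Int) :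
    ((A_dedup (PySem.List.sorted (A_letters indices) (fun x => x) false)).2).map
        (fun L => String.ofList [L])
      = ((PySem.List.pyRange 0 26 1).filter (fun k => PySem.Set.contains (B_present indices) k)).map
          (fun k => String.ofList [Char.ofNat (65 + k).toNat]) := by
  rw [A_dedup_snd, core_eq]
  have hr : PySem.List.pyRange 0 26 1 = (List.range 26).map (fun (k : Nat) => (k : Int)) := by decide
  rw [hr, List.filter_map, List.map_map, List.map_map]
  have hfil : ∀ k ∈ List.range 26,
      ((fun k => PySem.Set.contains (B_present indices) k) ∘ fun k : Nat => (k : Int)) k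
        = indices.any (fun i => i == (k : Int)) := by
    intro k hk
    have hk26 : k < 26 := List.mem_range.mp hk
    show PySem.Set.contains (B_present indices) (k : Int) = _
    unfold B_present
    rw [Bool.eq_iff_iff]
    simp only [PySem.Set.contains, List.contains_iff_mem, PySem.Set.mem_inter,
      PySem.Set.mem_ofList, PySem.List.mem_pyRange_one, List.any_eq_true, beq_iff_eq]
    constructor
    · rintro ⟨-, hmem⟩; exact ⟨_, hmem, rfl⟩
    · rintro ⟨i, hi, rfl⟩; exact ⟨⟨by omega, by exact_mod_cast hk26⟩, hi⟩
  rw [List.filter_congr hfil]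
  refine List.map_congr_left ?_
  intro k hk
  have hk26 : k < 26 := List.mem_range.mp (List.mem_of_mem_filter hk)
  show String.ofList [Char.ofNat (65 + k)] = String.ofList [Char.ofNat ((65 + (k : Int)).toNat)]
  have : ((65 : Int) + (k : Int)).toNat = 65 + k := by omega
  rw [this]

-- ===== VERDICT (by name: the statement is the Claim_ definition above) =====
theorem indices_to_letters_py_spec : Claim_equal_indices_to_letters_py := by
  intro indices _
  unfold Spec_indices_to_letters_py indices_to_letters_py indices_to_letters_py_alt
  rw [lists_eq]
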